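-- pv_equiv track=rewrite | github.com/adanzl/leetcode-practice | py/lcp/LCP73.py | adventureCamp
-- ===== SOURCE A (Python) =====
-- from typing import List
--
-- def adventureCamp(expeditions: List[str]) -> int:
--     mx_score, mx_idx = 0, -1
--     vis = set(expeditions[0].split('->'))
--     for i in range(1, len(expeditions)):
--         score = 0
--         for camp in expeditions[i].split('->'):
--             if camp and camp not in vis:
--                 score += 1
--                 vis.add(camp)
--         if score > mx_score:
--             mx_score, mx_idx = score, i
--     return mx_idx
-- ===== SOURCE B (Python) =====
-- def adventureCamp(expeditions):
--     # first[camp] = index of the expedition where this non-empty camp first appears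
--     first = {}
--     for i, e in enumerate(expeditions):
--         for camp in e.split('->'):
--             if camp:
--                 first.setdefault(camp, i)
--     # counts[i] = number of camps first discovered by expedition i
--     counts = [0] * len(expeditions)
--     for v in first.values():
--         counts[v] += 1
--     best_score, best_idx = 0, -1
--     for i in range(1, len(expeditions)):
--         if counts[i] > best_score:
--             best_score, best_idx = counts[i], i
--     return best_idx
-- ===== Notes on version B (the rewrite author's own statement) =====
-- stated objective: alternative
-- what changed: Replaces the running visited-set with a two-pass first-occurrence index: one pass records for each non-empty camp the first expedition that mentions it (dict.setdefault), a counting pass turns that into per-expedition scores, and a final scan picks the earliest maximum.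
-- crash fix: On an empty expeditions list A raises IndexError (expeditions[0]); B naturally returns -1. — e.g. on adventureCamp([]): A raises IndexError, B returns -1
import Mathlib
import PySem

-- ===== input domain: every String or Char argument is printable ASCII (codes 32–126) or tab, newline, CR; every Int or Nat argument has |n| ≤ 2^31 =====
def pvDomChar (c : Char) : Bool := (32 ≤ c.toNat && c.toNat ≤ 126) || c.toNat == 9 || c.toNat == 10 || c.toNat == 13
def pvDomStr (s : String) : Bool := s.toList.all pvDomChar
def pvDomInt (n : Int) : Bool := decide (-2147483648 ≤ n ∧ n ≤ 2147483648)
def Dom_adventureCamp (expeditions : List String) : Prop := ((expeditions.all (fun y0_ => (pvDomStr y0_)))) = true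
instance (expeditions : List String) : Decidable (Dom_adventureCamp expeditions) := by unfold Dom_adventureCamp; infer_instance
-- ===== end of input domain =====

-- B replaces A's running visited-set with a first-occurrence index per camp plus a counting pass (alternative decomposition, same cost).

-- ===== PORT A =====
-- inner loop body: 'if camp and camp not in vis: score += 1; vis.add(camp)'
def aInner (p : Int × PySem.Set String) (camp : String) : Int × PySem.Set String :=
  if camp ≠ "" ∧ ¬ (PySem.Set.contains p.2 camp = true) then (p.1 + 1, PySem.Set.add p.2 camp) else p

-- outer loop body over i ∈ range(1, len(expeditions)), state (mx_score, mx_idx, vis)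
def aOuter (expeditions : List String) (st : Int × Int × PySem.Set String) (i : Int) :
    Int × Int × PySem.Set String :=
  let r : Int × PySem.Set String := ((PySem.Str.split? (PySem.List.pyGetD expeditions i "") "->").getD []).foldl aInner (0, st.2.2)
  if r.1 > st.1 then (r.1, i, r.2) else (st.1, st.2.1, r.2)

def adventureCamp (expeditions : List String) : Int :=
  -- 'expeditions[0]' raises IndexError on []: that input is excluded by Pre_adventureCamp
  let vis : PySem.Set String := PySem.Set.ofList ((PySem.Str.split? (PySem.List.pyGetD expeditions 0 "") "->").getD [])
  ((PySem.List.pyRange 1 expeditions.length 1).foldl (aOuter expeditions) (0, -1, vis)).2.1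

-- ===== PORT B =====
-- first[camp] = smallest expedition index mentioning the non-empty camp
def bFirst (expeditions : List String) : PySem.Dict String Int :=
  (PySem.List.enumerate expeditions 0).foldl
    (fun d p => ((PySem.Str.split? p.2 "->").getD []).foldl
      (fun d camp => if camp ≠ "" then PySem.Dict.setdefault d camp p.1 else d) d)
    PySem.Dict.empty

def adventureCamp_alt (expeditions : List String) : Int :=
  let first := bFirst expeditions
  let counts := (PySem.Dict.values first).foldl
    (fun cs v => PySem.List.pySetD cs v (PySem.List.pyGetD cs v 0 + 1))
    (List.replicate expeditions.length (0 : Int))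
  ((PySem.List.pyRange 1 expeditions.length 1).foldl
    (fun (st : Int × Int) i =>
      if PySem.List.pyGetD counts i 0 > st.1 then (PySem.List.pyGetD counts i 0, i) else st)
    (0, -1)).2

-- ===== PRECONDITION & SPEC =====
-- Pre_ excludes only the empty list, on which A raises IndexError at expeditions[0].
def Pre_adventureCamp (expeditions : List String) : Prop := expeditions ≠ []
instance (expeditions : List String) : Decidable (Pre_adventureCamp expeditions) := by
  unfold Pre_adventureCamp; infer_instance
def pvWitness_adventureCamp : List String := ["a->b", "b->c"]

-- On the empty list A raises IndexError; B naturally returns -1.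
def Raises_adventureCamp (expeditions : List String) : Prop := expeditions = []
instance (expeditions : List String) : Decidable (Raises_adventureCamp expeditions) := by
  unfold Raises_adventureCamp; infer_instance
def pvRaiseWitness_adventureCamp : List String := []
def pvRaiseWitnessOut_adventureCamp : Int := -1

def Spec_adventureCamp (expeditions : List String) (out : Int) : Prop := out = adventureCamp_alt expeditions
instance (expeditions : List String) (out : Int) : Decidable (Spec_adventureCamp expeditions out) := by unfold Spec_adventureCamp; infer_instance

-- ===== CLAIM (what is proved, stated in full; the proofs are below) =====
def Claim_equal_adventureCamp : Prop := ∀ (expeditions : List String), Dom_adventureCamp expeditions → Pre_adventureCamp expeditions → Spec_adventureCamp expeditions (adventureCamp expeditions)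
def Claim_raises_adventureCamp : Prop := (∀ (expeditions : List String), Dom_adventureCamp expeditions → Raises_adventureCamp expeditions → ¬ Pre_adventureCamp expeditions) ∧ (Dom_adventureCamp (pvRaiseWitness_adventureCamp) ∧ Raises_adventureCamp (pvRaiseWitness_adventureCamp) ∧ adventureCamp_alt (pvRaiseWitness_adventureCamp) = pvRaiseWitnessOut_adventureCamp)


-- ===== LEMMAS AND PROOFS =====

-- camps of one expedition string
def pvCamps (e : String) : List String := (PySem.Str.split? e "->").getD []

-- "camp c appears in one of the first i camp lists"
abbrev pvSeen (cs : List (List String)) (i : Nat) (c : String) : Prop := c ∈ (cs.take i).flatMap id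

-- number of distinct non-empty camps first appearing in camp list i
def pvScore (cs : List (List String)) (i : Nat) : Nat :=
  ((cs.getD i []).toFinset.filter (fun c => c ≠ "" ∧ ¬ pvSeen cs i c)).card

-- the common selection step both programs perform
def pvSel (cs : List (List String)) (st : Int × Int) (i : Int) : Int × Int :=
  if (pvScore cs i.toNat : Int) > st.1 then ((pvScore cs i.toNat : Int), i) else st

theorem pv_inner_fst (l : List String) : ∀ (vis : PySem.Set String) (k : Int),
    (l.foldl aInner (k, vis)).1
      = k + ((l.toFinset.filter (fun c => c ≠ "" ∧ c ∉ vis)).card : Int) := by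
  induction l with
  | nil => simp
  | cons x t ih =>
    intro vis k
    by_cases hx : x ≠ "" ∧ x ∉ vis
    · have hcond : x ≠ "" ∧ ¬ (PySem.Set.contains vis x = true) :=
        ⟨hx.1, fun hm => hx.2 ((PySem.Set.contains_iff vis x).mp hm)⟩
      have hstep : aInner (k, vis) x = (k + 1, PySem.Set.add vis x) := by
        simp only [aInner, if_pos hcond]
      rw [List.foldl_cons, hstep, ih]
      have hset : t.toFinset.filter (fun c => c ≠ "" ∧ c ∉ PySem.Set.add vis x)
          = ((x :: t).toFinset.filter (fun c => c ≠ "" ∧ c ∉ vis)).erase x := by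
        ext d
        simp only [Finset.mem_filter, Finset.mem_erase, List.mem_toFinset, List.mem_cons,
          PySem.Set.mem_add]
        constructor
        · rintro ⟨hd, hne, hnm⟩
          rw [not_or] at hnm
          exact ⟨hnm.2, Or.inr hd, hne, hnm.1⟩
        · rintro ⟨hdx, hd | hd, hne, hnm⟩
          · exact absurd hd hdx
          · exact ⟨hd, hne, by rw [not_or]; exact ⟨hnm, hdx⟩⟩
      have hxmem : x ∈ (x :: t).toFinset.filter (fun c => c ≠ "" ∧ c ∉ vis) := by
        simp [hx.1, hx.2]
      rw [hset, Finset.card_erase_of_mem hxmem]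
      have hpos : 0 < ((x :: t).toFinset.filter (fun c => c ≠ "" ∧ c ∉ vis)).card :=
        Finset.card_pos.mpr ⟨x, hxmem⟩
      push_cast [Nat.cast_sub (Nat.one_le_iff_ne_zero.mpr (Nat.pos_iff_ne_zero.mp hpos))]
      ring
    · have hcond : ¬ (x ≠ "" ∧ ¬ (PySem.Set.contains vis x = true)) :=
        fun hc => hx ⟨hc.1, fun hm => hc.2 ((PySem.Set.contains_iff vis x).mpr hm)⟩
      have hstep : aInner (k, vis) x = (k, vis) := by
        simp only [aInner, if_neg hcond]
      rw [List.foldl_cons, hstep, ih]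
      have hset : (x :: t).toFinset.filter (fun c => c ≠ "" ∧ c ∉ vis)
          = t.toFinset.filter (fun c => c ≠ "" ∧ c ∉ vis) := by
        ext d
        simp only [Finset.mem_filter, List.mem_toFinset, List.mem_cons]
        constructor
        · rintro ⟨hd | hd, hp⟩
          · exact absurd hp (hd ▸ hx)
          · exact ⟨hd, hp⟩
        · rintro ⟨hd, hp⟩; exact ⟨Or.inr hd, hp⟩
      rw [hset]

theorem pv_inner_snd (l : List String) : ∀ (vis : PySem.Set String) (k : Int) (c : String),
    c ∈ (l.foldl aInner (k, vis)).2 ↔ c ∈ vis ∨ (c ≠ "" ∧ c ∈ l) := by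
  induction l with
  | nil => simp
  | cons x t ih =>
    intro vis k c
    by_cases hx : x ≠ "" ∧ ¬ (PySem.Set.contains vis x = true)
    · have hstep : aInner (k, vis) x = (k + 1, PySem.Set.add vis x) := by
        simp only [aInner, if_pos hx]
      rw [List.foldl_cons, hstep, ih]
      simp only [PySem.Set.mem_add, List.mem_cons]
      constructor
      · rintro ((hc | hc) | hc)
        · exact Or.inl hc
        · exact Or.inr ⟨hc ▸ hx.1, Or.inl hc⟩
        · exact Or.inr ⟨hc.1, Or.inr hc.2⟩
      · rintro (hc | ⟨hne, hc | hc⟩)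
        · exact Or.inl (Or.inl hc)
        · exact Or.inl (Or.inr hc)
        · exact Or.inr ⟨hne, hc⟩
    · have hstep : aInner (k, vis) x = (k, vis) := by
        simp only [aInner, if_neg hx]
      rw [List.foldl_cons, hstep, ih]
      simp only [List.mem_cons]
      rw [not_and, not_not] at hx
      constructor
      · rintro (hc | hc)
        · exact Or.inl hc
        · exact Or.inr ⟨hc.1, Or.inr hc.2⟩
      · rintro (hc | ⟨hne, hc | hc⟩)
        · exact Or.inl hc
        · exact Or.inl ((PySem.Set.contains_iff vis x).mp (hx (hc ▸ hne)) |> (hc ▸ ·))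
        · exact Or.inr ⟨hne, hc⟩

theorem pv_seen_succ (cs : List (List String)) (i : Nat) (hi : i < cs.length) (c : String) :
    pvSeen cs (i + 1) c ↔ pvSeen cs i c ∨ c ∈ cs.getD i [] := by
  unfold pvSeen
  have h1 : cs.take (i + 1) = cs.take i ++ [cs[i]] := by
    rw [List.take_add_one, List.getElem?_eq_getElem hi]; rfl
  have h2 : cs.getD i [] = cs[i] := by
    rw [List.getD_eq_getElem?_getD, List.getElem?_eq_getElem hi]; rfl
  rw [h1, h2, List.flatMap_append]
  simp

theorem pv_outerA (es : List String) : ∀ (k i : Nat), es.length - i ≤ k → 1 ≤ i →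
    ∀ (mx idx : Int) (vis : PySem.Set String),
    (∀ c, c ≠ "" → (c ∈ vis ↔ pvSeen (es.map pvCamps) i c)) →
    ((PySem.List.pyRange (i : Int) (es.length : Int) 1).foldl (aOuter es) (mx, idx, vis)).2.1
      = ((PySem.List.pyRange (i : Int) (es.length : Int) 1).foldl (pvSel (es.map pvCamps)) (mx, idx)).2 := by
  intro k
  induction k with
  | zero =>
    intro i hk hi mx idx vis hvis
    rw [PySem.List.pyRange_one_eq_nil (by exact_mod_cast Nat.le_of_sub_eq_zero (Nat.le_zero.mp hk))]
    rfl
  | succ k ih =>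
    intro i hk hi mx idx vis hvis
    by_cases hlt : i < es.length
    · have hilen : (i : Int) < (es.length : Int) := by exact_mod_cast hlt
      rw [PySem.List.pyRange_one_cons hilen, List.foldl_cons, List.foldl_cons]
      have hmaplen : (es.map pvCamps).length = es.length := List.length_map ..
      have hlt' : i < (es.map pvCamps).length := by rw [hmaplen]; exact hlt
      have hcamps : (PySem.Str.split? (PySem.List.pyGetD es (i : Int) "") "->").getD []
          = (es.map pvCamps).getD i [] := by
        rw [PySem.List.pyGetD_natCast, List.getD_eq_getElem?_getD, List.getD_eq_getElem?_getD,
          List.getElem?_eq_getElem hlt, List.getElem?_eq_getElem hlt']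
        simp [pvCamps]
      set cs := es.map pvCamps with hcs
      set l := cs.getD i [] with hl
      set r := (l.foldl aInner (0, vis)) with hr
      have hstep : aOuter es (mx, idx, vis) (i : Int)
          = if r.1 > mx then (r.1, (i : Int), r.2) else (mx, idx, r.2) := by
        simp only [aOuter, hcamps, hr, hl, hcs]
      have hscore : r.1 = (pvScore cs i : Int) := by
        rw [hr, pv_inner_fst]
        unfold pvScore
        rw [← hl]
        have : l.toFinset.filter (fun c => c ≠ "" ∧ c ∉ vis)
            = l.toFinset.filter (fun c => c ≠ "" ∧ ¬ pvSeen cs i c) := by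
          apply Finset.filter_congr
          intro x _
          exact and_congr_right (fun hne => not_congr (hvis x hne))
        rw [this]
        simp
      have hvis' : ∀ c, c ≠ "" → (c ∈ r.2 ↔ pvSeen cs (i + 1) c) := by
        intro c hne
        rw [hr, pv_inner_snd, pv_seen_succ cs i hlt', hvis c hne, ← hl]
        constructor
        · rintro (hc | hc)
          · exact Or.inl hc
          · exact Or.inr hc.2
        · rintro (hc | hc)
          · exact Or.inl hc
          · exact Or.inr ⟨hne, hc⟩
      have hselstep : pvSel cs (mx, idx) (i : Int)
          = if r.1 > mx then (r.1, (i : Int)) else (mx, idx) := by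
        simp only [pvSel, hscore, Int.toNat_natCast]
      have hcast : ((i : Int) + 1) = (((i + 1 : Nat)) : Int) := by push_cast; ring
      have hk' : es.length - (i + 1) ≤ k := by omega
      rw [hstep, hselstep]
      by_cases hgt : r.1 > mx
      · rw [if_pos hgt, if_pos hgt, hcast]
        exact ih (i + 1) hk' (by omega) r.1 (i : Int) r.2 hvis'
      · rw [if_neg hgt, if_neg hgt, hcast]
        exact ih (i + 1) hk' (by omega) mx idx r.2 hvis'
    · rw [PySem.List.pyRange_one_eq_nil (by exact_mod_cast Nat.le_of_not_lt hlt)]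
      rfl

theorem pv_A_main (es : List String) (h : es ≠ []) :
    adventureCamp es
      = ((PySem.List.pyRange 1 (es.length : Int) 1).foldl (pvSel (es.map pvCamps)) (0, -1)).2 := by
  obtain ⟨e0, t, rfl⟩ : ∃ e0 t, es = e0 :: t := by
    cases es with
    | nil => exact absurd rfl h
    | cons a l => exact ⟨a, l, rfl⟩
  unfold adventureCamp
  have h0 : PySem.List.pyGetD (e0 :: t) 0 "" = e0 := by
    exact_mod_cast PySem.List.pyGetD_natCast (e0 :: t) 0 ""
  have hvis0 : ∀ c, c ≠ "" →
      (c ∈ PySem.Set.ofList ((PySem.Str.split? (PySem.List.pyGetD (e0 :: t) 0 "") "->").getD [])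
        ↔ pvSeen ((e0 :: t).map pvCamps) 1 c) := by
    intro c hne
    rw [PySem.Set.mem_ofList, h0]
    unfold pvSeen
    simp [pvCamps]
  have hone : ((1 : Nat) : Int) = (1 : Int) := by norm_num
  have := pv_outerA (e0 :: t) (e0 :: t).length 1 (by omega) (by omega) 0 (-1) _ hvis0
  rw [hone] at this
  exact this

-- ---- B side ----

def pvBInner (d : PySem.Dict String Int) (l : List String) (i : Int) : PySem.Dict String Int :=
  l.foldl (fun d camp => if camp ≠ "" then d.setdefault camp i else d) d

def pvFold (s : Int) (es : List String) (d : PySem.Dict String Int) : PySem.Dict String Int :=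
  (PySem.List.enumerate es s).foldl
    (fun d p => pvBInner d (pvCamps p.2) p.1) d

theorem pv_bFirst_eq (es : List String) : bFirst es = pvFold 0 es PySem.Dict.empty := rfl

theorem pv_get?_bInner (l : List String) : ∀ (d : PySem.Dict String Int) (i : Int) (c : String),
    (pvBInner d l i).get? c
      = if c ≠ "" ∧ c ∈ l ∧ d.get? c = none then some i else d.get? c := by
  induction l with
  | nil => intro d i c; simp [pvBInner]
  | cons x tl ih =>
    intro d i c
    unfold pvBInner
    rw [List.foldl_cons]
    by_cases hx : x ≠ ""
    · rw [if_pos hx]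
      have ihx := ih (d.setdefault x i) i c
      unfold pvBInner at ihx
      rw [ihx]
      by_cases hcx : c = x
      · subst hcx
        rw [PySem.Dict.get?_setdefault_self]
        by_cases hdc : d.get? c = none
        · rw [hdc]
          have h1 : ¬ (c ≠ "" ∧ c ∈ tl ∧ (some ((none : Option Int).getD i) = none)) := by
            simp
          rw [if_neg h1, if_pos ⟨hx, List.mem_cons_self .., rfl⟩]
          simp
        · obtain ⟨v, hv⟩ := Option.ne_none_iff_exists'.mp hdc
          rw [hv]
          have h1 : ¬ (c ≠ "" ∧ c ∈ tl ∧ (some ((some v).getD i) = none)) := by simp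
          have h2 : ¬ (c ≠ "" ∧ c ∈ c :: tl ∧ (some v : Option Int) = none) := by simp
          rw [if_neg h1, if_neg h2]
          simp
      · rw [PySem.Dict.get?_setdefault_of_ne _ _ hcx]
        apply if_congr _ rfl rfl
        constructor
        · rintro ⟨h1, h2, h3⟩; exact ⟨h1, List.mem_cons_of_mem _ h2, h3⟩
        · rintro ⟨h1, h2, h3⟩
          rcases List.mem_cons.mp h2 with h | h
          · exact absurd h hcx
          · exact ⟨h1, h, h3⟩
    · rw [if_neg hx]
      have ihd := ih d i c
      unfold pvBInner at ihd
      rw [ihd]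
      rw [not_not] at hx
      apply if_congr _ rfl rfl
      constructor
      · rintro ⟨h1, h2, h3⟩; exact ⟨h1, List.mem_cons_of_mem _ h2, h3⟩
      · rintro ⟨h1, h2, h3⟩
        rcases List.mem_cons.mp h2 with h | h
        · exact absurd (h.trans hx) h1
        · exact ⟨h1, h, h3⟩

theorem pv_count_bInner (l : List String) : ∀ (d : PySem.Dict String Int) (i v : Int),
    (pvBInner d l i).values.count v
      = d.values.count v
        + (if v = i then (l.toFinset.filter (fun c => c ≠ "" ∧ d.get? c = none)).card else 0) := by
  induction l with
  | nil => intro d i v; simp [pvBInner]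
  | cons x tl ih =>
    intro d i v
    unfold pvBInner
    rw [List.foldl_cons]
    by_cases hx : x ≠ ""
    · rw [if_pos hx]
      by_cases hcont : d.contains x = true
      · rw [PySem.Dict.setdefault_of_contains _ _ hcont]
        have ihd := ih d i v
        unfold pvBInner at ihd
        rw [ihd]
        have hsome : d.get? x ≠ none := by
          rw [PySem.Dict.contains_eq_isSome_get?] at hcont
          intro hn
          rw [hn] at hcont
          simp at hcont
        have hset : ((x :: tl).toFinset.filter (fun c => c ≠ "" ∧ d.get? c = none))
            = tl.toFinset.filter (fun c => c ≠ "" ∧ d.get? c = none) := by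
          ext dd
          simp only [Finset.mem_filter, List.mem_toFinset, List.mem_cons]
          constructor
          · rintro ⟨hd | hd, hp⟩
            · exact absurd (hd ▸ hp.2) hsome
            · exact ⟨hd, hp⟩
          · rintro ⟨hd, hp⟩; exact ⟨Or.inr hd, hp⟩
        rw [hset]
      · have hcont' : d.contains x = false := by
          cases h' : d.contains x
          · rfl
          · exact absurd h' hcont
        rw [PySem.Dict.setdefault_of_not_contains _ _ hcont']
        have ihd := ih (d.insert x i) i v
        unfold pvBInner at ihd
        rw [ihd]
        have hvals : (d.insert x i).values = d.values ++ [i] := by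
          simp only [PySem.Dict.values, PySem.Dict.items_insert_of_not_contains _ _ hcont',
            List.map_append]
          rfl
        rw [hvals, List.count_append]
        have hget : d.get? x = none := by
          rw [PySem.Dict.contains_eq_isSome_get?] at hcont'
          exact Option.not_isSome_iff_eq_none.mp (by rw [hcont']; simp)
        have hset : ((x :: tl).toFinset.filter (fun c => c ≠ "" ∧ d.get? c = none))
            = insert x (tl.toFinset.filter (fun c => c ≠ "" ∧ (d.insert x i).get? c = none)) := by
          ext dd
          simp only [Finset.mem_filter, Finset.mem_insert, List.mem_toFinset, List.mem_cons,
            PySem.Dict.get?_insert]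
          constructor
          · rintro ⟨hd | hd, hp⟩
            · exact Or.inl hd
            · by_cases hdx : dd = x
              · exact Or.inl hdx
              · exact Or.inr ⟨hd, hp.1, by rw [if_neg hdx]; exact hp.2⟩
          · rintro (hd | ⟨hd, hp1, hp2⟩)
            · exact ⟨Or.inl hd, hd ▸ hx, hd ▸ hget⟩
            · by_cases hdx : dd = x
              · exact ⟨Or.inl hdx, hp1, hdx ▸ hget⟩
              · rw [if_neg hdx] at hp2
                exact ⟨Or.inr hd, hp1, hp2⟩
        have hxnot : x ∉ tl.toFinset.filter (fun c => c ≠ "" ∧ (d.insert x i).get? c = none) := by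
          simp only [Finset.mem_filter, List.mem_toFinset]
          rintro ⟨-, -, hp⟩
          rw [PySem.Dict.get?_insert] at hp
          simp at hp
        rw [hset, Finset.card_insert_of_notMem hxnot]
        by_cases hvi : v = i
        · subst hvi
          rw [if_pos rfl, if_pos rfl]
          simp
          ring
        · rw [if_neg hvi, if_neg hvi]
          have : ([i].count v) = 0 := by
            rw [List.count_singleton]
            simp only [beq_iff_eq]
            exact if_neg (fun h => hvi h.symm)
          rw [this]
    · rw [if_neg hx]
      have ihd := ih d i v
      unfold pvBInner at ihd
      rw [ihd]
      rw [not_not] at hx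
      have hset : ((x :: tl).toFinset.filter (fun c => c ≠ "" ∧ d.get? c = none))
          = tl.toFinset.filter (fun c => c ≠ "" ∧ d.get? c = none) := by
        ext dd
        simp only [Finset.mem_filter, List.mem_toFinset, List.mem_cons]
        constructor
        · rintro ⟨hd | hd, hp⟩
          · exact absurd (hd.trans hx) hp.1
          · exact ⟨hd, hp⟩
        · rintro ⟨hd, hp⟩; exact ⟨Or.inr hd, hp⟩
      rw [hset]

theorem pv_mem_values_bInner (l : List String) : ∀ (d : PySem.Dict String Int) (i v : Int),
    v ∈ (pvBInner d l i).values → v ∈ d.values ∨ v = i := by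
  induction l with
  | nil => intro d i v h; exact Or.inl h
  | cons x tl ih =>
    intro d i v h
    unfold pvBInner at h
    rw [List.foldl_cons] at h
    by_cases hx : x ≠ ""
    · rw [if_pos hx] at h
      have := ih (d.setdefault x i) i v (by unfold pvBInner; exact h)
      rcases this with hm | hm
      · by_cases hcont : d.contains x = true
        · rw [PySem.Dict.setdefault_of_contains _ _ hcont] at hm
          exact Or.inl hm
        · have hcont' : d.contains x = false := by
            cases h' : d.contains x
            · rfl
            · exact absurd h' hcont
          rw [PySem.Dict.setdefault_of_not_contains _ _ hcont'] at hm
          rcases PySem.Dict.mem_values_insert _ _ _ _ hm with hm' | hm'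
          · exact Or.inr hm'
          · exact Or.inl hm'
      · exact Or.inr hm
    · rw [if_neg hx] at h
      exact ih d i v (by unfold pvBInner; exact h)

theorem pv_fold_cons (e : String) (t : List String) (s : Int) (d : PySem.Dict String Int) :
    pvFold s (e :: t) d = pvFold (s + 1) t (pvBInner d (pvCamps e) s) := by
  unfold pvFold
  rw [PySem.List.enumerate_cons, List.foldl_cons]

theorem pv_fold_nil (s : Int) (d : PySem.Dict String Int) : pvFold s [] d = d := by
  unfold pvFold
  rw [PySem.List.enumerate_nil]
  rfl

theorem pv_count_fold_lt (es : List String) : ∀ (s : Int) (d : PySem.Dict String Int) (v : Int),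
    v < s → (pvFold s es d).values.count v = d.values.count v := by
  induction es with
  | nil => intro s d v _; rw [pv_fold_nil]
  | cons e t ih =>
    intro s d v hv
    rw [pv_fold_cons, ih (s + 1) _ v (by omega), pv_count_bInner, if_neg (by omega)]
    simp

theorem pv_values_fold_bound (es : List String) : ∀ (s : Int) (d : PySem.Dict String Int),
    0 ≤ s → (∀ v ∈ d.values, 0 ≤ v ∧ v < s) →
    ∀ v ∈ (pvFold s es d).values, 0 ≤ v ∧ v < s + es.length := by
  induction es with
  | nil =>
    intro s d _ hd v hv
    rw [pv_fold_nil] at hv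
    have := hd v hv
    simpa using ⟨this.1, by omega⟩
  | cons e t ih =>
    intro s d hs hd v hv
    rw [pv_fold_cons] at hv
    have hd' : ∀ w ∈ (pvBInner d (pvCamps e) s).values, 0 ≤ w ∧ w < s + 1 := by
      intro w hw
      rcases pv_mem_values_bInner _ _ _ _ hw with hm | hm
      · have := hd w hm; omega
      · omega
    have := ih (s + 1) _ (by omega) hd' v hv
    simp only [List.length_cons] at this ⊢
    push_cast at this ⊢
    omega

theorem pv_count_fold (es : List String) : ∀ (s : Int) (d : PySem.Dict String Int) (i : Nat),
    i < es.length →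
    (pvFold s es d).values.count (s + (i : Int))
      = d.values.count (s + (i : Int))
        + ((pvCamps (es.getD i "")).toFinset.filter
            (fun c => c ≠ "" ∧ d.get? c = none ∧ ¬ pvSeen (es.map pvCamps) i c)).card := by
  induction es with
  | nil => intro s d i hi; simp at hi
  | cons e t ih =>
    intro s d i hi
    rw [pv_fold_cons]
    cases i with
    | zero =>
      have hz : s + ((0 : Nat) : Int) = s := by norm_num
      rw [hz, pv_count_fold_lt t (s + 1) _ s (by omega), pv_count_bInner, if_pos rfl]
      have hpred : ∀ c ∈ (pvCamps ((e :: t).getD 0 "")).toFinset,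
          ((c ≠ "" ∧ d.get? c = none ∧ ¬ pvSeen ((e :: t).map pvCamps) 0 c)
            ↔ (c ≠ "" ∧ d.get? c = none)) := by
        intro c _
        simp [pvSeen]
      rw [Finset.filter_congr hpred]
      rfl
    | succ j =>
      have hj : j < t.length := by simpa using hi
      have hcast : s + ((j + 1 : Nat) : Int) = (s + 1) + (j : Int) := by push_cast; ring
      rw [hcast, ih (s + 1) _ j hj]
      have hne : ((s + 1) + (j : Int)) ≠ s := by omega
      rw [pv_count_bInner, if_neg hne]
      have hgetD : (e :: t).getD (j + 1) "" = t.getD j "" := rfl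
      have hpred : ∀ c ∈ (pvCamps (t.getD j "")).toFinset,
          ((c ≠ "" ∧ (pvBInner d (pvCamps e) s).get? c = none ∧ ¬ pvSeen (t.map pvCamps) j c)
            ↔ (c ≠ "" ∧ d.get? c = none ∧ ¬ pvSeen ((e :: t).map pvCamps) (j + 1) c)) := by
        intro c _
        rw [pv_get?_bInner]
        have hseen : pvSeen ((e :: t).map pvCamps) (j + 1) c
            ↔ c ∈ pvCamps e ∨ pvSeen (t.map pvCamps) j c := by
          unfold pvSeen
          simp
        constructor
        · rintro ⟨h1, h2, h3⟩
          by_cases hcond : (c ≠ "" ∧ c ∈ pvCamps e ∧ d.get? c = none)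
          · rw [if_pos hcond] at h2
            exact absurd h2 (Option.some_ne_none _)
          · rw [if_neg hcond] at h2
            refine ⟨h1, h2, ?_⟩
            rw [hseen]
            rintro (hm | hm)
            · exact hcond ⟨h1, hm, h2⟩
            · exact h3 hm
        · rintro ⟨h1, h2, h3⟩
          rw [hseen] at h3
          have hnm : c ∉ pvCamps e := fun hm => h3 (Or.inl hm)
          refine ⟨h1, ?_, fun hm => h3 (Or.inr hm)⟩
          rw [if_neg (fun hc => hnm hc.2.1)]
          exact h2
      rw [Finset.filter_congr hpred, hgetD]
      ring

theorem pv_counts_arr (vl : List Int) : ∀ (arr : List Int),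
    (∀ v ∈ vl, 0 ≤ v ∧ v < (arr.length : Int)) →
    ∀ (i : Nat), i < arr.length →
    PySem.List.pyGetD
        (vl.foldl (fun cs v => PySem.List.pySetD cs v (PySem.List.pyGetD cs v 0 + 1)) arr)
        (i : Int) 0
      = PySem.List.pyGetD arr (i : Int) 0 + (vl.count (i : Int) : Int) := by
  induction vl with
  | nil => intro arr _ i hi; simp
  | cons v t ihv =>
    intro arr hb i hi
    rw [List.foldl_cons]
    have hvb := hb v (List.mem_cons_self ..)
    have hvn : v.toNat < arr.length := by omega
    have hvcast : ((v.toNat : Nat) : Int) = v := Int.toNat_of_nonneg hvb.1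
    have hlen' : (PySem.List.pySetD arr v (PySem.List.pyGetD arr v 0 + 1)).length = arr.length :=
      PySem.List.length_pySetD ..
    have hb' : ∀ w ∈ t, 0 ≤ w ∧ w < ((PySem.List.pySetD arr v (PySem.List.pyGetD arr v 0 + 1)).length : Int) := by
      rw [hlen']
      exact fun w hw => hb w (List.mem_cons_of_mem _ hw)
    rw [ihv _ hb' i (by rw [hlen']; exact hi)]
    have hget := PySem.List.pyGetD_pySetD_natCast arr v.toNat i (PySem.List.pyGetD arr v 0 + 1) 0 hvn
    rw [hvcast] at hget
    rw [hget, List.count_cons]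
    by_cases hiv : i = v.toNat
    · rw [if_pos hiv]
      have : (v == (i : Int)) = true := by
        rw [beq_iff_eq]; omega
      rw [this]
      have : PySem.List.pyGetD arr v 0 = PySem.List.pyGetD arr (i : Int) 0 := by
        rw [← hvcast, hiv]
      rw [this]
      push_cast
      simp only [if_true]
      ring
    · rw [if_neg hiv]
      have : (v == (i : Int)) = false := by
        rw [beq_eq_false_iff_ne]; intro h; omega
      rw [this]
      push_cast
      ring

theorem pv_B_main (es : List String) :
    adventureCamp_alt es
      = ((PySem.List.pyRange 1 (es.length : Int) 1).foldl (pvSel (es.map pvCamps)) (0, -1)).2 := by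
  have hkey : ∀ x : Int, 1 ≤ x → x < (es.length : Int) →
      PySem.List.pyGetD ((PySem.Dict.values (bFirst es)).foldl
          (fun cs v => PySem.List.pySetD cs v (PySem.List.pyGetD cs v 0 + 1))
          (List.replicate es.length (0 : Int))) x 0
        = (pvScore (es.map pvCamps) x.toNat : Int) := by
    intro x hx1 hx2
    have hx0 : (0 : Int) ≤ x := by omega
    have hxe : ((x.toNat : Nat) : Int) = x := Int.toNat_of_nonneg hx0
    have hxlt : x.toNat < es.length := by omega
    have hvempty : (PySem.Dict.empty : PySem.Dict String Int).values = [] := rfl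
    have hbound : ∀ v ∈ (PySem.Dict.values (bFirst es)),
        0 ≤ v ∧ v < ((List.replicate es.length (0 : Int)).length : Int) := by
      rw [List.length_replicate]
      intro v hv
      rw [pv_bFirst_eq] at hv
      have := pv_values_fold_bound es 0 PySem.Dict.empty le_rfl
        (by rw [hvempty]; intro w hw; exact absurd hw (List.not_mem_nil)) v hv
      simpa using this
    rw [← hxe, pv_counts_arr _ _ hbound x.toNat (by rw [List.length_replicate]; exact hxlt)]
    have hrep : PySem.List.pyGetD (List.replicate es.length (0 : Int)) ((x.toNat : Nat) : Int) 0 = 0 := by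
      rw [PySem.List.pyGetD_natCast]
      simp
    rw [hrep, pv_bFirst_eq]
    have hcount := pv_count_fold es 0 PySem.Dict.empty x.toNat hxlt
    have h0 : (0 : Int) + ((x.toNat : Nat) : Int) = ((x.toNat : Nat) : Int) := by ring
    rw [h0] at hcount
    rw [hcount, hvempty]
    have hpred : ∀ c ∈ (pvCamps (es.getD x.toNat "")).toFinset,
        ((c ≠ "" ∧ (PySem.Dict.empty : PySem.Dict String Int).get? c = none
            ∧ ¬ pvSeen (es.map pvCamps) x.toNat c)
          ↔ (c ≠ "" ∧ ¬ pvSeen (es.map pvCamps) x.toNat c)) := by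
      intro c _
      have : (PySem.Dict.empty : PySem.Dict String Int).get? c = none := rfl
      rw [this]
      simp
    rw [Finset.filter_congr hpred]
    unfold pvScore
    simp only [Int.toNat_natCast]
    have hxlt' : x.toNat < (es.map pvCamps).length := by
      rw [List.length_map]; exact hxlt
    have hmap : (es.map pvCamps).getD x.toNat [] = pvCamps (es.getD x.toNat "") := by
      rw [List.getD_eq_getElem?_getD, List.getD_eq_getElem?_getD,
        List.getElem?_eq_getElem hxlt, List.getElem?_eq_getElem hxlt']
      simp
    rw [hmap]
    simp
  simp only [adventureCamp_alt]
  apply congrArg Prod.snd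
  apply PySem.List.foldl_congr_mem
  intro acc x hx
  obtain ⟨hx1, hx2⟩ := PySem.List.mem_pyRange_one.mp hx
  simp only [pvSel]
  rw [hkey x hx1 hx2]

-- ===== VERDICT (by name: the statement is the Claim_ definition above) =====
theorem adventureCamp_spec : Claim_equal_adventureCamp := by
  intro es _ hpre
  unfold Spec_adventureCamp
  rw [pv_A_main es hpre, pv_B_main es]

theorem adventureCamp_raises : Claim_raises_adventureCamp := by
  unfold Claim_raises_adventureCamp
  exact ⟨fun es _ h hp => hp h, by decide⟩

-- self-check: B's port really returns the recorded value -1 on the input where A raises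
theorem pvRaiseWitness_adventureCamp_ok :
    adventureCamp_alt pvRaiseWitness_adventureCamp = pvRaiseWitnessOut_adventureCamp :=
  adventureCamp_raises.2.2.2
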